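-- pv_equiv track=rewrite | github.com/miliar/Code_Jam_Webscraper | solutions_python/Problem_178/3587.py | solve
-- ===== SOURCE A (Python) =====
-- def solve(stack):
--     current = '+'
--     flips = 0
--     for l in stack[::-1]:
--         if l != current:
--             flips += 1
--             current = l
--     return str(flips)
-- ===== SOURCE B (Python) =====
-- def solve(stack):
--     runs = []
--     for x in stack:
--         if not runs or runs[-1] != x:
--             runs.append(x)
--     if not runs:
--         return '0'
--     return str(len(runs) - 1 + (1 if runs[-1] != '+' else 0))
-- ===== Notes on version B (the rewrite author's own statement) =====
-- stated objective: alternative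
-- what changed: B builds the list of run keys in one forward pass and returns a closed-form count (runs-1 plus 1 if the last run is not '+'), replacing A's reversed scan with a running current/flips state.
import Mathlib
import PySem

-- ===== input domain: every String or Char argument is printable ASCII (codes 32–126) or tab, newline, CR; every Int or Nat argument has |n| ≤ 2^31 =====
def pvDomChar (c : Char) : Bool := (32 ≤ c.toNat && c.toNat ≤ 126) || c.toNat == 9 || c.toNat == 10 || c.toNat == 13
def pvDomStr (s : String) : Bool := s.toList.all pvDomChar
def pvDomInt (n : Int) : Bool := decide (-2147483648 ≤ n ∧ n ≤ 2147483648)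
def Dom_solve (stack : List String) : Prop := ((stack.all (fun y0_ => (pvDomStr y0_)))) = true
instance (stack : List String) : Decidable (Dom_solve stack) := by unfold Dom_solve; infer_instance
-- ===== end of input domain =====

-- B builds the list of run keys in one forward pass and finishes with a closed-form
-- count (runs − 1, plus 1 if the last run key is not "+"), replacing A's reversed scan
-- with a running current/flips state (objective: alternative decomposition, same cost).

-- ===== PORT A =====
def solve (stack : List String) : String :=
  -- stack[::-1]
  let rev := (PySem.List.slice? stack none none (-1)).getD []
  -- for l in rev: if l != current: flips += 1; current = l
  let st := rev.foldl (fun (s : String × Int) l => if l ≠ s.1 then (l, s.2 + 1) else s) ("+", 0)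
  PySem.Int.toStr st.2

-- ===== PORT B =====
def solve_alt (stack : List String) : String :=
  let runs := stack.foldl
    (fun (runs : List String) x =>
      if runs.isEmpty || runs.getLast? ≠ some x then runs ++ [x] else runs) []
  if runs.isEmpty then "0"
  else PySem.Int.toStr ((runs.length : Int) - 1 + (if runs.getLast? ≠ some "+" then 1 else 0))

-- ===== PRECONDITION & SPEC =====
def Spec_solve (stack : List String) (out : String) : Prop := out = solve_alt stack
instance (stack : List String) (out : String) : Decidable (Spec_solve stack out) := by unfold Spec_solve; infer_instance

-- ===== CLAIM (what is proved, stated in full; the proofs are below) =====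
def Claim_equal_solve : Prop := ∀ (stack : List String), Dom_solve stack → Spec_solve stack (solve stack)

-- ===== LEMMAS AND PROOFS =====

/-- Number of flips A counts while scanning `l` with current symbol `c`. -/
def chg (c : String) : List String → Int
  | [] => 0
  | x :: xs => (if x = c then 0 else 1) + chg x xs

/-- Run keys of `l` given that the previous symbol was `c`. -/
def runsFrom (c : String) : List String → List String
  | [] => []
  | x :: xs => if x = c then runsFrom c xs else x :: runsFrom x xs

theorem aFold (l : List String) : ∀ (c : String) (f : Int),
    (l.foldl (fun (s : String × Int) l => if l ≠ s.1 then (l, s.2 + 1) else s) (c, f)).2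
      = f + chg c l := by
  induction l with
  | nil => intro c f; simp [chg]
  | cons x xs ih =>
      intro c f
      rw [List.foldl_cons]
      by_cases h : x = c
      · rw [if_neg (by simp [h])]
        rw [ih]; simp [chg, h]
      · rw [if_pos (by simp [h])]
        rw [ih]; simp [chg, h]; ring

theorem bFold (l : List String) : ∀ (acc : List String) (c : String),
    acc.getLast? = some c →
    (l.foldl (fun (runs : List String) x =>
        if runs.isEmpty || runs.getLast? ≠ some x then runs ++ [x] else runs) acc)
      = acc ++ runsFrom c l := by
  induction l with
  | nil => intro acc c _; simp [runsFrom]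
  | cons x xs ih =>
      intro acc c hc
      have hne : acc ≠ [] := by intro h; simp [h] at hc
      rw [List.foldl_cons]
      by_cases h : x = c
      · subst h
        rw [if_neg (by simp [List.isEmpty_iff, hne, hc])]
        rw [ih acc x hc]
        simp [runsFrom]
      · rw [if_pos (by simp [hc]; exact Or.inr fun e => h e.symm)]
        have hlast : (acc ++ [x]).getLast? = some x := by simp
        rw [ih (acc ++ [x]) x hlast]
        simp [runsFrom, h]

theorem len_runsFrom (l : List String) : ∀ c, ((runsFrom c l).length : Int) = chg c l := by
  induction l with
  | nil => intro c; simp [runsFrom, chg]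
  | cons x xs ih =>
      intro c
      by_cases h : x = c
      · simp [runsFrom, chg, h, ih]
      · simp [runsFrom, chg, h, ih]
        ring

theorem last_runsFrom (l : List String) : ∀ c, (runsFrom c l).getLastD c = l.getLastD c := by
  induction l with
  | nil => intro c; simp [runsFrom]
  | cons x xs ih =>
      intro c
      by_cases h : x = c
      · simp only [runsFrom, if_pos h]
        subst h
        rw [List.getLastD_cons]
        exact ih x
      · simp only [runsFrom, if_neg h]
        rw [List.getLastD_cons, List.getLastD_cons]
        exact ih x

theorem getLast?_cons_eq (c : String) (l : List String) :
    (c :: l).getLast? = some (l.getLastD c) := by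
  induction l generalizing c with
  | nil => simp
  | cons y t ih => simp [List.getLast?_cons_cons, ih]

theorem chg_append (l : List String) : ∀ (c x : String),
    chg c (l ++ [x]) = chg c l + (if x = l.getLastD c then 0 else 1) := by
  induction l with
  | nil => intro c x; simp [chg]
  | cons y ys ih =>
      intro c x
      simp only [List.cons_append, chg, ih, List.getLastD_cons]
      ring

theorem chg_reverse (l : List String) : ∀ d, l ≠ [] →
    chg d l.reverse = chg (l.headD d) l.tail + (if l.getLastD d = d then 0 else 1) := by
  induction l with
  | nil => intro d h; exact absurd rfl h
  | cons x xs ih =>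
      intro d _
      have hstep : chg d (x :: xs).reverse
          = chg d xs.reverse + (if x = xs.reverse.getLastD d then 0 else 1) := by
        rw [List.reverse_cons, chg_append]
      cases xs with
      | nil => simp [chg]
      | cons h t =>
          have hx : (h :: t).reverse.getLastD d = h := by
            simp [List.getLastD_eq_getLast?, List.getLast?_reverse]
          rw [hstep, hx, ih d (by simp)]
          simp only [chg, List.getLastD_cons, List.headD, List.tail_cons]
          by_cases hxh : h = x
          · simp [hxh]
          · have hxh' : ¬ x = h := fun e => hxh e.symm
            simp [hxh, hxh']
            ring

theorem solve_eq_chg (stack : List String) :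
    solve stack = PySem.Int.toStr (chg "+" stack.reverse) := by
  simp [solve, PySem.List.slice?_none_none_neg_one]
  have := aFold stack.reverse "+" 0
  simp at this
  rw [this]

theorem solve_alt_cons (x : String) (xs : List String) :
    solve_alt (x :: xs)
      = PySem.Int.toStr (((x :: runsFrom x xs).length : Int) - 1
          + (if (x :: runsFrom x xs).getLast? ≠ some "+" then 1 else 0)) := by
  have h0 : (x :: xs).foldl (fun (runs : List String) x =>
      if runs.isEmpty || runs.getLast? ≠ some x then runs ++ [x] else runs) []
      = [x] ++ runsFrom x xs := by
    rw [List.foldl_cons, if_pos (by simp)]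
    exact bFold xs [x] x (by simp)
  simp only [solve_alt, h0]
  rfl

-- ===== VERDICT (by name: the statement is the Claim_ definition above) =====
theorem solve_spec : Claim_equal_solve := by
  intro stack _
  unfold Spec_solve
  cases stack with
  | nil => decide
  | cons x xs =>
      rw [solve_eq_chg, solve_alt_cons,
        chg_reverse (x :: xs) "+" (by simp), getLast?_cons_eq, last_runsFrom]
      simp only [List.headD, List.tail_cons, List.getLastD_cons]
      congr 1
      have hlen := len_runsFrom xs x
      have hlen1 : ((x :: runsFrom x xs).length : Int) = ((runsFrom x xs).length : Int) + 1 := by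
        simp
      simp only [List.getLastD_eq_getLast?]
      by_cases hc : xs.getLast?.getD x = "+"
      · rw [if_pos hc, if_neg (by simp [hc])]; omega
      · rw [if_neg hc, if_pos (by simp [hc])]; omega
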